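-- pv_equiv track=rewrite | github.com/Liwenbin1996/Data_Structures_and_Algorithms | OtherQuestion.py | maxABS2
-- ===== SOURCE A (Python) =====
-- def maxABS2(arr):
--     res = 0
--     lHelp = []
--     rHelp = []
--     lHelp.append(arr[0])
--     rHelp.append(arr[-1])
--     for i in range(1, len(arr)):
--         lHelp.append(arr[i] if arr[i] > lHelp[-1] else lHelp[-1])
--     for i in range(len(arr)-2, -1, -1):
--         rHelp.append(arr[i] if arr[i] > rHelp[-1] else rHelp[-1])
--     rHelp = rHelp[::-1]
--     for i in range(len(arr)):
--         res = max(abs(lHelp[i] - rHelp[i]), res)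
--     return res
-- ===== SOURCE B (Python) =====
-- def maxABS2(arr):
--     return max(arr) - min(arr[0], arr[-1])
-- ===== Notes on version B (the rewrite author's own statement) =====
-- stated objective: faster
-- what changed: Replaced the three index loops building prefix-max and suffix-max arrays with the closed form: maximum of the whole list minus the smaller of its first and last element, valid because the optimal split always pairs the global maximum with one end element.
import Mathlib
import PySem

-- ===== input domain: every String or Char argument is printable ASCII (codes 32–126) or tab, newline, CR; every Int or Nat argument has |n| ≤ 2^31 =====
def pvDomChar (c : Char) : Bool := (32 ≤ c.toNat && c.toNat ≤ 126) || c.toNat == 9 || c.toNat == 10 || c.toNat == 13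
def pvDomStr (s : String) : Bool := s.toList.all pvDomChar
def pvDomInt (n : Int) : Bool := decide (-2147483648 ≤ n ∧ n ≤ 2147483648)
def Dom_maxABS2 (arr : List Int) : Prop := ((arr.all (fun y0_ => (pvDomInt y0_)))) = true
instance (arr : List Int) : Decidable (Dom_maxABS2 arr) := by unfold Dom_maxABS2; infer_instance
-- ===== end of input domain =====

-- B replaces A's three loops and two auxiliary prefix/suffix-max arrays by the closed form
-- max of the list minus the smaller of its first and last element (objective: faster, one builtin pass).

-- ===== PORT A =====
-- The two building loops read successive elements of arr (indices 1..n-1, resp. n-2..0) and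
-- append to the accumulator; they are ported as folds over those same element sequences with
-- the same list-with-last accumulator.  The final loop pairs lHelp[i] with rHelp[i] for
-- i in range(len arr); both lists have length len arr, so it is the fold over their zip.
def maxABS2 (arr : List Int) : Int :=
  match arr with
  | [] => 0  -- Python raises IndexError reading the first element; excluded by Pre_maxABS2
  | a :: rest =>
    let l := (a :: rest).getLastD 0  -- the last element; arr nonempty
    let lHelp := rest.foldl
      (fun acc x => acc ++ [if x > acc.getLastD 0 then x else acc.getLastD 0]) [a]
    let rHelp := (a :: rest).dropLast.reverse.foldl
      (fun acc x => acc ++ [if x > acc.getLastD 0 then x else acc.getLastD 0]) [l]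
    let rHelp := rHelp.reverse
    (lHelp.zip rHelp).foldl (fun res p => max |p.1 - p.2| res) 0

-- ===== PORT B =====
def maxABS2_alt (arr : List Int) : Int :=
  match PySem.List.max? arr (fun y => y), PySem.List.pyGet? arr 0, PySem.List.pyGet? arr (-1) with
  | some m, some a, some b => m - min a b
  | _, _, _ => 0  -- unreachable: arr ≠ [] under Pre_maxABS2

-- ===== PRECONDITION & SPEC =====
-- Pre_ excludes exactly the empty list, on which both Pythons raise (A: IndexError, B: ValueError).
def Pre_maxABS2 (arr : List Int) : Prop := arr ≠ []
instance (arr : List Int) : Decidable (Pre_maxABS2 arr) := by unfold Pre_maxABS2; infer_instance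
def pvWitness_maxABS2 : List Int := [3, -1, 4]
def Spec_maxABS2 (arr : List Int) (out : Int) : Prop := out = maxABS2_alt arr
instance (arr : List Int) (out : Int) : Decidable (Spec_maxABS2 arr out) := by unfold Spec_maxABS2; infer_instance

-- ===== CLAIM (what is proved, stated in full; the proofs are below) =====
def Claim_equal_maxABS2 : Prop := ∀ (arr : List Int), Dom_maxABS2 arr → Pre_maxABS2 arr → Spec_maxABS2 arr (maxABS2 arr)

-- ===== LEMMAS AND PROOFS =====

-- prefix-max scan: scan m xs = [max m x1, max m x1 x2, …]
def pvScan (m : Int) : List Int → List Int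
  | [] => []
  | x :: xs => max m x :: pvScan (max m x) xs

theorem pvScan_length (m : Int) (xs : List Int) : (pvScan m xs).length = xs.length := by
  induction xs generalizing m with
  | nil => rfl
  | cons x xs ih => simp [pvScan, ih]

theorem pv_le_foldl_max (i : Int) (ys : List Int) : i ≤ ys.foldl max i := by
  induction ys generalizing i with
  | nil => exact le_refl i
  | cons y ys ih => exact le_trans (le_max_left i y) (ih (max i y))

theorem pv_mem_le_foldl_max (x i : Int) (ys : List Int) (hx : x ∈ ys) : x ≤ ys.foldl max i := by
  induction ys generalizing i with
  | nil => cases hx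
  | cons y ys ih =>
    rcases List.mem_cons.mp hx with hx | hx
    · subst hx; exact le_trans (le_max_right i x) (pv_le_foldl_max _ ys)
    · exact ih _ hx

theorem pvIfMax (b x : Int) : (if b < x then x else b) = max b x := by
  rcases le_total x b with h | h
  · rw [if_neg (not_lt.mpr h), max_eq_left h]
  · rcases eq_or_lt_of_le h with h | h
    · rw [h]; simp
    · rw [if_pos h, max_eq_right h.le]

theorem pvGetLastD_concat (l : List Int) (c : Int) : ∀ d : Int, (l ++ [c]).getLastD d = c := by
  induction l with
  | nil => intro d; rfl
  | cons x l ih => intro d; rw [List.cons_append, List.getLastD_cons, ih x]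

theorem pvFold_scan (xs : List Int) : ∀ (pre : List Int), pre ≠ [] →
    xs.foldl (fun acc x => acc ++ [if x > acc.getLastD 0 then x else acc.getLastD 0]) pre
      = pre ++ pvScan (pre.getLastD 0) xs := by
  induction xs with
  | nil => intro pre _; simp [pvScan]
  | cons x xs ih =>
    intro pre hpre
    have hc : (if x > pre.getLastD 0 then x else pre.getLastD 0) = max (pre.getLastD 0) x :=
      pvIfMax (pre.getLastD 0) x
    simp only [List.foldl_cons]
    rw [ih _ (by simp), pvGetLastD_concat _ _ 0, hc, pvScan]
    simp

theorem pvScan_getLastD (xs : List Int) : ∀ m d : Int,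
    ((m :: pvScan m xs).getLastD d) = xs.foldl max m := by
  induction xs with
  | nil => intro m d; rfl
  | cons x xs ih =>
    intro m d
    rw [List.getLastD_cons]
    show ((max m x :: pvScan (max m x) xs).getLastD m) = _
    rw [ih (max m x) m, List.foldl_cons]

theorem pvScan_bounds (xs : List Int) : ∀ m : Int,
    ∀ y ∈ m :: pvScan m xs, m ≤ y ∧ y ≤ xs.foldl max m := by
  induction xs with
  | nil =>
    intro m y hy
    have : y = m := by simpa [pvScan] using hy
    subst this; exact ⟨le_refl y, le_refl y⟩
  | cons x xs ih =>
    intro m y hy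
    rcases List.mem_cons.mp hy with hy | hy
    · subst hy; exact ⟨le_refl y, pv_le_foldl_max y (x :: xs)⟩
    · have h := ih (max m x) y (by simpa [pvScan] using hy)
      exact ⟨le_trans (le_max_left m x) h.1, by rw [List.foldl_cons]; exact h.2⟩

-- foldl max lands in init :: elements
theorem pvFoldMax_mem (xs : List Int) : ∀ m : Int, xs.foldl max m ∈ m :: xs := by
  induction xs with
  | nil => intro m; simp
  | cons x xs ih =>
    intro m
    have h := ih (max m x)
    rcases List.mem_cons.mp h with h | h
    · rcases max_choice m x with hm | hm <;> rw [List.foldl_cons, h, hm] <;> simp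
    · simp [List.foldl_cons, h]

-- foldl max is invariant under permutation of (init :: elements)
theorem pvFoldMax_perm {xs ys : List Int} {m m' : Int} (h : (m :: xs).Perm (m' :: ys)) :
    xs.foldl max m = ys.foldl max m' := by
  have le1 : ∀ (zs : List Int) (i : Int), ∀ x ∈ i :: zs, x ≤ zs.foldl max i := by
    intro zs i x hx
    rcases List.mem_cons.mp hx with hx | hx
    · rw [hx]; exact pv_le_foldl_max i zs
    · exact pv_mem_le_foldl_max x i zs hx
  apply le_antisymm
  · exact le1 ys m' _ (h.mem_iff.mp (pvFoldMax_mem xs m))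
  · exact le1 xs m _ (h.symm.mem_iff.mp (pvFoldMax_mem ys m'))

-- A's final fold, bounded above and below
theorem pvZipFold_le (pl : List (Int × Int)) (C : Int) :
    ∀ r, r ≤ C → (∀ p ∈ pl, |p.1 - p.2| ≤ C) →
    pl.foldl (fun res p => max |p.1 - p.2| res) r ≤ C := by
  induction pl with
  | nil => intro r hr _; simpa using hr
  | cons p pl ih =>
    intro r hr hall
    simp only [List.foldl_cons]
    exact ih _ (max_le (hall p (by simp)) hr) (fun q hq => hall q (by simp [hq]))

theorem pvZipFold_init_le (pl : List (Int × Int)) :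
    ∀ r, r ≤ pl.foldl (fun res p => max |p.1 - p.2| res) r := by
  induction pl with
  | nil => intro r; simp
  | cons p pl ih =>
    intro r
    simp only [List.foldl_cons]
    exact le_trans (le_max_right _ _) (ih _)

theorem pvZipFold_ge (pl : List (Int × Int)) :
    ∀ r, ∀ p ∈ pl, |p.1 - p.2| ≤ pl.foldl (fun res p => max |p.1 - p.2| res) r := by
  induction pl with
  | nil => intro r p hp; cases hp
  | cons q pl ih =>
    intro r p hp
    simp only [List.foldl_cons]
    rcases List.mem_cons.mp hp with hp | hp
    · rw [hp]
      exact le_trans (le_max_left _ _) (pvZipFold_init_le pl _)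
    · exact ih _ p hp

theorem pvZip_head_mem (xs ys : List Int) (hx : xs ≠ []) (hy : ys ≠ []) :
    (xs.head hx, ys.head hy) ∈ xs.zip ys := by
  cases xs with
  | nil => cases hx rfl
  | cons x xs =>
    cases ys with
    | nil => cases hy rfl
    | cons y ys => simp

theorem pvZip_last_mem (xs ys : List Int) (hx : xs ≠ []) (hy : ys ≠ [])
    (hlen : xs.length = ys.length) :
    (xs.getLast hx, ys.getLast hy) ∈ xs.zip ys := by
  have hpos : 0 < xs.length := List.length_pos_of_ne_nil hx
  have h1 : xs.length - 1 < xs.length := by omega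
  have h2 : xs.length - 1 < ys.length := by omega
  have hzlen : xs.length - 1 < (xs.zip ys).length := by
    rw [List.length_zip]; omega
  have hz : (xs.zip ys)[xs.length - 1]'hzlen
      = (xs[xs.length - 1]'h1, ys[xs.length - 1]'h2) := List.getElem_zip ..
  have hmem := List.getElem_mem hzlen
  rw [hz] at hmem
  rw [List.getLast_eq_getElem hx, List.getLast_eq_getElem hy]
  convert hmem using 3
  omega

theorem pvGetLastD_eq_getLast (l : List Int) (d : Int) (h : l ≠ []) :
    l.getLastD d = l.getLast h := by
  rw [List.getLastD_eq_getLast?, List.getLast?_eq_some_getLast h]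
  rfl

theorem pv_main (arr : List Int) (h : arr ≠ []) : maxABS2 arr = maxABS2_alt arr := by
  obtain ⟨a, rest, rfl⟩ := List.exists_cons_of_ne_nil h
  -- names
  have hne : (a :: rest) ≠ [] := h
  set l : Int := (a :: rest).getLastD 0 with hl
  set rev : List Int := (a :: rest).dropLast.reverse with hrev
  set M : Int := rest.foldl max a with hM
  have hlast : l = (a :: rest).getLast hne := pvGetLastD_eq_getLast _ 0 hne
  -- the two scans
  have hAeq : maxABS2 (a :: rest) =
      ((a :: pvScan a rest).zip ((l :: pvScan l rev).reverse)).foldl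
        (fun res p => max |p.1 - p.2| res) 0 := by
    simp only [maxABS2]
    rw [← hrev, ← hl, pvFold_scan rest [a] (by simp), pvFold_scan rev [l] (by simp)]
    simp
  -- permutation: l :: rev is a rearrangement of arr, so its running max is M
  have hdrop : (a :: rest).dropLast ++ [l] = a :: rest := by
    rw [hlast]; exact List.dropLast_append_getLast hne
  have hperm : (l :: rev).Perm (a :: rest) := by
    have h1 : (l :: rev).Perm (l :: (a :: rest).dropLast) := (List.reverse_perm _).cons l
    have h2 : (l :: (a :: rest).dropLast).Perm ((a :: rest).dropLast ++ [l]) :=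
      (List.perm_append_singleton _ _).symm
    rw [hdrop] at h2
    exact h1.trans h2
  have hMrev : rev.foldl max l = M := pvFoldMax_perm hperm
  -- bounds on the zipped fold
  have haM : a ≤ M := pv_le_foldl_max a rest
  have hlM : l ≤ M := le_trans (pv_le_foldl_max l rev) (le_of_eq hMrev)
  have hlen1 : (a :: pvScan a rest).length = rest.length + 1 := by
    simp [pvScan_length]
  have hlen2 : (l :: pvScan l rev).length = rest.length + 1 := by
    simp [pvScan_length, hrev]
  have hbound : ∀ p ∈ (a :: pvScan a rest).zip ((l :: pvScan l rev).reverse),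
      |p.1 - p.2| ≤ M - min a l := by
    intro p hp
    obtain ⟨p1, p2⟩ := p
    obtain ⟨h1, h2⟩ := List.of_mem_zip hp
    have hb1 := pvScan_bounds rest a p1 h1
    have hb2 := pvScan_bounds rev l p2 (List.mem_reverse.mp h2)
    rw [hMrev] at hb2
    rw [← hM] at hb1
    have h3 := min_le_left a l
    have h4 := min_le_right a l
    simp only []
    rw [abs_sub_le_iff]
    omega
  -- end pairs of the zip
  have hxne : (a :: pvScan a rest) ≠ [] := by simp
  have hyne : (l :: pvScan l rev).reverse ≠ [] := by simp
  have hlenz : (a :: pvScan a rest).length = (l :: pvScan l rev).reverse.length := by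
    rw [List.length_reverse, hlen1, hlen2]
  have hheadR : (l :: pvScan l rev).reverse.head hyne = M := by
    rw [List.head_reverse, ← pvGetLastD_eq_getLast _ 0 (by simp), pvScan_getLastD rev l 0, hMrev]
  have hlastL : (a :: pvScan a rest).getLast hxne = M := by
    rw [← pvGetLastD_eq_getLast _ 0 hxne, pvScan_getLastD rest a 0, ← hM]
  have hlastR : (l :: pvScan l rev).reverse.getLast hyne = l := by
    rw [List.getLast_reverse]; exact List.head_cons
  have hmem1 : ((a : Int), M) ∈ (a :: pvScan a rest).zip ((l :: pvScan l rev).reverse) := by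
    have hm := pvZip_head_mem _ _ hxne hyne
    rwa [hheadR, List.head_cons] at hm
  have hmem2 : (M, l) ∈ (a :: pvScan a rest).zip ((l :: pvScan l rev).reverse) := by
    have hm := pvZip_last_mem _ _ hxne hyne hlenz
    rwa [hlastL, hlastR] at hm
  -- lower and upper bounds on A's result
  have hlow1 := pvZipFold_ge _ 0 _ hmem1
  have hlow2 := pvZipFold_ge _ 0 _ hmem2
  have hup := pvZipFold_le _ (M - min a l) 0
    (by have := min_le_left a l; omega) hbound
  have habs1 : |(a, M).1 - (a, M).2| = M - a := by
    simp only []; rw [abs_sub_comm, abs_of_nonneg (by omega)]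
  have habs2 : |(M, l).1 - (M, l).2| = M - l := by
    simp only []; rw [abs_of_nonneg (by omega)]
  rw [habs1] at hlow1
  rw [habs2] at hlow2
  -- B's closed form
  have hB : maxABS2_alt (a :: rest) = M - min a l := by
    simp only [maxABS2_alt, PySem.List.max?_id_cons, PySem.List.pyGet?_zero_cons,
      PySem.List.pyGet?_neg_one, List.getLast?_eq_some_getLast hne, ← hlast, ← hM]
  rw [hAeq, hB]
  rcases min_choice a l with hmin | hmin <;> rw [hmin] at hup ⊢ <;> omega

theorem maxABS2_spec : Claim_equal_maxABS2 := by
  intro arr _ hpre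
  unfold Spec_maxABS2
  exact pv_main arr hpre
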